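-- pv_equiv track=rewrite | github.com/Zcg321/JarvisPrime-Monorepo | tmp_jp3/foreman_loop.py | extract_status_excerpt
-- ===== SOURCE A (Python) =====
-- def extract_status_excerpt(codex_text):
--     """
--     Heuristic: find a STATUS-like summary in Codex output.
--     We look for a fenced block or lines starting with 'STATUS'/'What/Why/Testing'.
--     If none, return first ~30 lines as excerpt.
--     """
--     lines = codex_text.splitlines()
--     buf, take = [], False
--     for ln in lines:
--         if "STATUS" in ln.upper() or "What:" in ln or "WHY:" in ln.upper():
--             take = True
--         if take:
--             buf.append(ln)
--             if len(buf) > 60: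
--                 break
--     if not buf:
--         buf = lines[:30]
--     excerpt = "\n".join(buf).strip()
--     return excerpt[:3000]
-- ===== SOURCE B (Python) =====
-- def extract_status_excerpt(codex_text):
--     """Search-then-slice: find the first STATUS-like line, then slice; simpler decomposition."""
--     lines = codex_text.splitlines()
--     i = next((k for k, ln in enumerate(lines)
--               if "STATUS" in ln.upper() or "What:" in ln or "WHY:" in ln.upper()), None)
--     buf = lines[i:i + 61] if i is not None else lines[:30]
--     return "\n".join(buf).strip()[:3000]
-- ===== Notes on version B (the rewrite author's own statement) =====
-- stated objective: simpler
-- what changed: Replaced A's one-pass flagged accumulator loop (set take on first STATUS-like line, append with a >60 break) by a two-phase search-then-slice: find the index of the first matching line, then take lines[i:i+61] or lines[:30] as a slice.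
import Mathlib
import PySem

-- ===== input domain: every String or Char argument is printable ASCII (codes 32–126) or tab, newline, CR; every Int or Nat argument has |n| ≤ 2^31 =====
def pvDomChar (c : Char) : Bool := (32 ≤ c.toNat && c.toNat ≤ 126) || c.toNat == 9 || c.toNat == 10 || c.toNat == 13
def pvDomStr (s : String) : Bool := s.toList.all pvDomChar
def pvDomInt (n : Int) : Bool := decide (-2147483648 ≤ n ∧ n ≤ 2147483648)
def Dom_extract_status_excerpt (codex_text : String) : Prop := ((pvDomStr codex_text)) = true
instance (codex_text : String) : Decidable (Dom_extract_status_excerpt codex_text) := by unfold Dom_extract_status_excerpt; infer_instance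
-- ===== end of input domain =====

-- B re-implements A as a search-then-slice two-phase decomposition (find the first
-- STATUS-like line, then slice lines[i:i+61]) instead of A's one-pass flagged
-- accumulator loop; same cost, simpler structure (objective: simpler).

-- ===== PORT A =====
-- the shared line predicate: "STATUS" in ln.upper() or "What:" in ln or "WHY:" in ln.upper()
def pvStatusLine (ln : String) : Bool :=
  PySem.Str.isIn "STATUS" (PySem.Str.upper ln) || PySem.Str.isIn "What:" ln
    || PySem.Str.isIn "WHY:" (PySem.Str.upper ln)

-- A's loop: 'for ln in lines: if pred: take=True; if take: buf.append(ln); if len(buf)>60: break'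
def pvLoopA : List String → List String → Bool → List String
  | [], buf, _ => buf
  | ln :: rest, buf, take =>
    let take := take || pvStatusLine ln
    if take then
      let buf := buf ++ [ln]
      if buf.length > 60 then buf else pvLoopA rest buf take
    else pvLoopA rest buf take

def extract_status_excerpt (codex_text : String) : String :=
  let lines := PySem.Str.splitlines codex_text
  let buf := pvLoopA lines [] false
  let buf := if buf = [] then PySem.List.slice lines none (some 30) else buf
  let excerpt := PySem.Str.strip (PySem.Str.join "\n" buf)
  PySem.Str.slice excerpt none (some 3000)

-- ===== PORT B =====
def extract_status_excerpt_alt (codex_text : String) : String :=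
  let lines := PySem.Str.splitlines codex_text
  let buf := match lines.findIdx? pvStatusLine with
    | some i => PySem.List.slice lines (some (i : Int)) (some ((i : Int) + 61))
    | none => PySem.List.slice lines none (some 30)
  PySem.Str.slice (PySem.Str.strip (PySem.Str.join "\n" buf)) none (some 3000)

-- ===== PRECONDITION & SPEC =====
def Spec_extract_status_excerpt (codex_text : String) (out : String) : Prop := out = extract_status_excerpt_alt codex_text
instance (codex_text : String) (out : String) : Decidable (Spec_extract_status_excerpt codex_text out) := by unfold Spec_extract_status_excerpt; infer_instance

-- ===== CLAIM (what is proved, stated in full; the proofs are below) =====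
def Claim_equal_extract_status_excerpt : Prop := ∀ (codex_text : String), Dom_extract_status_excerpt codex_text → Spec_extract_status_excerpt codex_text (extract_status_excerpt codex_text)

-- ===== LEMMAS AND PROOFS =====

-- once take=True, A appends every remaining line until buf reaches 61 elements
lemma pvLoopA_true (ls : List String) : ∀ buf : List String, buf.length ≤ 60 →
    pvLoopA ls buf true = buf ++ ls.take (61 - buf.length) := by
  induction ls with
  | nil => intro buf _; simp [pvLoopA]
  | cons ln rest ih =>
    intro buf h
    by_cases h60 : buf.length = 60
    · simp [pvLoopA, h60]
    · have hlt : buf.length < 60 := by omega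
      have : ¬ (buf ++ [ln]).length > 60 := by simp; omega
      simp only [pvLoopA, Bool.true_or, if_neg this]
      rw [ih (buf ++ [ln]) (by simp; omega)]
      have h1 : 61 - buf.length = (60 - buf.length) + 1 := by omega
      simp [h1, List.take_succ_cons]

-- A's whole loop from the initial state equals search-then-slice
lemma pvLoopA_eq_find (ls : List String) :
    pvLoopA ls [] false =
      match ls.findIdx? pvStatusLine with
      | some i => (ls.drop i).take 61
      | none => [] := by
  induction ls with
  | nil => simp [pvLoopA]
  | cons ln rest ih =>
    by_cases hp : pvStatusLine ln
    · simp only [pvLoopA, Bool.false_or, hp]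
      have : ¬ ([] ++ [ln] : List String).length > 60 := by simp
      rw [if_neg this]
      rw [pvLoopA_true rest ([] ++ [ln]) (by simp)]
      simp [List.findIdx?_cons, hp]
    · simp only [pvLoopA, Bool.false_or, hp, if_neg (by simp : ¬ (false = true))]
      rw [ih]
      simp only [List.findIdx?_cons, hp]
      cases h : rest.findIdx? pvStatusLine <;> simp

lemma pvFindIdx?_lt_length {α : Type} (p : α → Bool) (ls : List α) (i : Nat)
    (h : ls.findIdx? p = some i) : i < ls.length :=
  (List.findIdx?_eq_some_iff_findIdx_eq.mp h).1

-- ===== VERDICT (by name: the statement is the Claim_ definition above) =====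
theorem extract_status_excerpt_spec : Claim_equal_extract_status_excerpt := by
  intro codex_text _
  unfold Spec_extract_status_excerpt extract_status_excerpt extract_status_excerpt_alt
  set ls := PySem.Str.splitlines codex_text with hls
  show (let buf := pvLoopA ls [] false;
        let buf := if buf = [] then PySem.List.slice ls none (some 30) else buf;
        PySem.Str.slice (PySem.Str.strip (PySem.Str.join "\n" buf)) none (some 3000)) = _
  rw [pvLoopA_eq_find]
  cases h : ls.findIdx? pvStatusLine with
  | none => simp [h]
  | some i =>
    have hi : i < ls.length := pvFindIdx?_lt_length _ _ _ h
    have hne : (ls.drop i).take 61 ≠ [] := by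
      simp [List.take_eq_nil_iff, List.drop_eq_nil_iff]; omega
    simp only [h, if_neg hne]
    have : PySem.List.slice ls (some (i : Int)) (some ((i : Int) + 61)) = (ls.drop i).take 61 := by
      have := PySem.List.slice_natCast_add (xs := ls) (j := i) (n := 61)
      simpa using this
    rw [this]
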